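-- pv_equiv track=rewrite | github.com/Semantic-Infrastructure-Lab/reveal | reveal/adapters/domain/adapter.py | _generate_domain_next_steps
-- ===== SOURCE A (Python) =====
-- from typing import Dict, Any, Optional, List
--
-- def _generate_domain_next_steps(checks: List[Dict[str, Any]], domain: str) -> List[str]:
--     """Generate contextual next steps based on check results.
--
--     Args:
--         checks: List of check result dicts
--         domain: Domain name
--
--     Returns:
--         List of next step suggestions
--     """
--     next_steps = []
--
--     # DNS resolution failures
--     if any(c['name'] == 'dns_resolution' and c['status'] == 'failure' for c in checks):
--         next_steps.append("Check DNS configuration with registrar")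
--         next_steps.append(f"View DNS records: reveal domain://{domain}/dns")
--
--     # DNS propagation warnings
--     if any(c['name'] == 'dns_propagation' and c['status'] == 'warning' for c in checks):
--         next_steps.append("DNS propagation in progress - wait and check again")
--
--     # SSL certificate issues
--     if any(c['name'] == 'ssl_certificate' and c['status'] in ('failure', 'warning') for c in checks):
--         next_steps.append(f"Inspect SSL certificate: reveal ssl://{domain} --check-advanced")
--
--     # HTTP response failures
--     if any(c['name'] == 'http_response' and c['status'] == 'failure' for c in checks):
--         next_steps.append(f"Check nginx config: reveal nginx://{domain}")
--         next_steps.append(f"Verify nginx upstream is reachable: reveal nginx://{domain}/upstream")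
--
--     # HTTP redirect to unexpected service
--     if any(c['name'] == 'http_response' and c['status'] == 'warning' for c in checks):
--         next_steps.append(f"Inspect nginx vhost config: reveal nginx://{domain}")
--
--     # Default next steps if all passed
--     if not next_steps:
--         next_steps.append(f"View DNS records: reveal domain://{domain}/dns")
--         next_steps.append(f"View SSL certificate: reveal ssl://{domain}")
--
--     return next_steps
-- ===== SOURCE B (Python) =====
-- def _rules(domain):
--     # (check name, triggering statuses, suggestions) -- data, not code
--     return [
--         ('dns_resolution', ['failure'],
--          ["Check DNS configuration with registrar",
--           f"View DNS records: reveal domain://{domain}/dns"]),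
--         ('dns_propagation', ['warning'],
--          ["DNS propagation in progress - wait and check again"]),
--         ('ssl_certificate', ['failure', 'warning'],
--          [f"Inspect SSL certificate: reveal ssl://{domain} --check-advanced"]),
--         ('http_response', ['failure'],
--          [f"Check nginx config: reveal nginx://{domain}",
--           f"Verify nginx upstream is reachable: reveal nginx://{domain}/upstream"]),
--         ('http_response', ['warning'],
--          [f"Inspect nginx vhost config: reveal nginx://{domain}"]),
--     ]
--
-- def _generate_domain_next_steps(checks, domain):
--     rules = _rules(domain)
--     targets = {name for name, _, _ in rules}
--     # one pass: group the statuses seen per relevant check name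
--     statuses = {}
--     for c in checks:
--         name = c['name']
--         if name in targets:
--             statuses.setdefault(name, set()).add(c['status'])
--     # generic rule engine: emit each rule's messages when triggered
--     next_steps = [msg
--                   for name, triggers, msgs in rules
--                   if any(st in statuses.get(name, set()) for st in triggers)
--                   for msg in msgs]
--     if not next_steps:
--         next_steps = [f"View DNS records: reveal domain://{domain}/dns",
--                       f"View SSL certificate: reveal ssl://{domain}"]
--     return next_steps
-- ===== Notes on version B (the rewrite author's own statement) =====
-- stated objective: alternative
-- what changed: B replaces A's five hard-coded any() re-scans and if-chain by a data-driven rule table plus one grouping pass that builds a dict check-name -> set of statuses; next_steps is a comprehension over the rule table triggered by the grouped statuses.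
import Mathlib
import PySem

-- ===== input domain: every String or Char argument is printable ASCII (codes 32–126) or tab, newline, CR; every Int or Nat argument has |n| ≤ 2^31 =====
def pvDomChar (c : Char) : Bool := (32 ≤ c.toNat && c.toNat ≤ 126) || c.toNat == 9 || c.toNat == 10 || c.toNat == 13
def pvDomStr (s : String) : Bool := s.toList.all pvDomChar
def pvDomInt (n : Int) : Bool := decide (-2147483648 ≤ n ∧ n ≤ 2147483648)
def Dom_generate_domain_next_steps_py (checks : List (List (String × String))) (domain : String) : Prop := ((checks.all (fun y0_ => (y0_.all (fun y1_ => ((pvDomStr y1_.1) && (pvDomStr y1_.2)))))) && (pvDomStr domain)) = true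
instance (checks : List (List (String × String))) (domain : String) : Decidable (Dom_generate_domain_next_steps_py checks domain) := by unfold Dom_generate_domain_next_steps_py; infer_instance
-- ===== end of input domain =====

-- B replaces A's five hard-coded any() re-scans and if-chain by a data-driven rule table plus
-- one grouping pass (dict name -> set of statuses); objective: alternative decomposition.

-- ===== PORT A =====
def generate_domain_next_steps_py (checks : List (List (String × String))) (domain : String) : List String :=
  let ns : List String := []
  let ns := if checks.any (fun c => ((PySem.Dict.mk c).get? "name" == some "dns_resolution") && ((PySem.Dict.mk c).get? "status" == some "failure")) then
      ns ++ ["Check DNS configuration with registrar", "View DNS records: reveal domain://" ++ domain ++ "/dns"] else ns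
  let ns := if checks.any (fun c => ((PySem.Dict.mk c).get? "name" == some "dns_propagation") && ((PySem.Dict.mk c).get? "status" == some "warning")) then
      ns ++ ["DNS propagation in progress - wait and check again"] else ns
  let ns := if checks.any (fun c => ((PySem.Dict.mk c).get? "name" == some "ssl_certificate") && (((PySem.Dict.mk c).get? "status" == some "failure") || ((PySem.Dict.mk c).get? "status" == some "warning"))) then
      ns ++ ["Inspect SSL certificate: reveal ssl://" ++ domain ++ " --check-advanced"] else ns
  let ns := if checks.any (fun c => ((PySem.Dict.mk c).get? "name" == some "http_response") && ((PySem.Dict.mk c).get? "status" == some "failure")) then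
      ns ++ ["Check nginx config: reveal nginx://" ++ domain, "Verify nginx upstream is reachable: reveal nginx://" ++ domain ++ "/upstream"] else ns
  let ns := if checks.any (fun c => ((PySem.Dict.mk c).get? "name" == some "http_response") && ((PySem.Dict.mk c).get? "status" == some "warning")) then
      ns ++ ["Inspect nginx vhost config: reveal nginx://" ++ domain] else ns
  if ns.isEmpty then ns ++ ["View DNS records: reveal domain://" ++ domain ++ "/dns", "View SSL certificate: reveal ssl://" ++ domain] else ns

-- ===== PORT B =====
-- the rule table of Source B: (check name, triggering statuses, suggestions)
def pvRules (domain : String) : List (String × List String × List String) :=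
  [("dns_resolution", ["failure"],
      ["Check DNS configuration with registrar", "View DNS records: reveal domain://" ++ domain ++ "/dns"]),
   ("dns_propagation", ["warning"],
      ["DNS propagation in progress - wait and check again"]),
   ("ssl_certificate", ["failure", "warning"],
      ["Inspect SSL certificate: reveal ssl://" ++ domain ++ " --check-advanced"]),
   ("http_response", ["failure"],
      ["Check nginx config: reveal nginx://" ++ domain, "Verify nginx upstream is reachable: reveal nginx://" ++ domain ++ "/upstream"]),
   ("http_response", ["warning"],
      ["Inspect nginx vhost config: reveal nginx://" ++ domain])]

-- body of Source B's grouping loop (a missing key is a Python KeyError; those inputs are outside Pre_)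
def pvStep (targets : PySem.Set String) (d : PySem.Dict String (PySem.Set String)) (c : List (String × String)) : PySem.Dict String (PySem.Set String) :=
  match (PySem.Dict.mk c).get? "name" with
  | none => d
  | some n =>
    if PySem.Set.contains targets n then
      match (PySem.Dict.mk c).get? "status" with
      | none => d
      | some st => d.insert n (PySem.Set.add (d.getD n PySem.Set.empty) st)
    else d

def generate_domain_next_steps_py_alt (checks : List (List (String × String))) (domain : String) : List String :=
  let rules := pvRules domain
  let targets : PySem.Set String := PySem.Set.ofList (rules.map Prod.fst)
  let statuses := checks.foldl (pvStep targets) PySem.Dict.empty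
  let next_steps := rules.flatMap (fun r =>
    if r.2.1.any (fun st => PySem.Set.contains (statuses.getD r.1 PySem.Set.empty) st) then r.2.2 else [])
  if next_steps.isEmpty then
    ["View DNS records: reveal domain://" ++ domain ++ "/dns", "View SSL certificate: reveal ssl://" ++ domain]
  else next_steps

-- ===== PRECONDITION & SPEC =====
def pvTargetNames : List String := ["dns_resolution", "dns_propagation", "ssl_certificate", "http_response"]

-- Pre_ excludes checks with a duplicate key (first-vs-last-match is an unspecified corner of the
-- assoc-list dict model), checks lacking a 'name' key, and target-named checks lacking a 'status'
-- key: on the latter two A raises KeyError, or returns only by accident of any()'s short-circuit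
-- skipping the malformed check (B raises there).
def Pre_generate_domain_next_steps_py (checks : List (List (String × String))) (domain : String) : Prop :=
  ∀ c ∈ checks, (c.map Prod.fst).Nodup ∧
    ((PySem.Dict.mk c).get? "name").isSome = true ∧
    ((((PySem.Dict.mk c).get? "name").getD "") ∈ pvTargetNames → ((PySem.Dict.mk c).get? "status").isSome = true)
instance (checks : List (List (String × String))) (domain : String) : Decidable (Pre_generate_domain_next_steps_py checks domain) := by unfold Pre_generate_domain_next_steps_py; infer_instance

def pvWitness_generate_domain_next_steps_py : (List (List (String × String))) × String :=
  ([[("name", "dns_resolution"), ("status", "failure")], [("name", "http_response"), ("status", "success")]], "a.com")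

def Spec_generate_domain_next_steps_py (checks : List (List (String × String))) (domain : String) (out : List String) : Prop := out = generate_domain_next_steps_py_alt checks domain
instance (checks : List (List (String × String))) (domain : String) (out : List String) : Decidable (Spec_generate_domain_next_steps_py checks domain out) := by unfold Spec_generate_domain_next_steps_py; infer_instance

-- ===== CLAIM (what is proved, stated in full; the proofs are below) =====
def Claim_equal_generate_domain_next_steps_py : Prop := ∀ (checks : List (List (String × String))) (domain : String), Dom_generate_domain_next_steps_py checks domain → Pre_generate_domain_next_steps_py checks domain → Spec_generate_domain_next_steps_py checks domain (generate_domain_next_steps_py checks domain)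

-- ===== LEMMAS AND PROOFS =====

-- invariant of B's grouping loop: the set grouped under a target name n holds st
-- iff some check has name n and status st
lemma mem_getD_foldl_pvStep (T : PySem.Set String) (n st : String) (hn : n ∈ T) :
    ∀ (checks : List (List (String × String))) (d : PySem.Dict String (PySem.Set String)),
      (st ∈ (checks.foldl (pvStep T) d).getD n PySem.Set.empty
       ↔ st ∈ d.getD n PySem.Set.empty ∨ (checks.any (fun c =>
            ((PySem.Dict.mk c).get? "name" == some n) && ((PySem.Dict.mk c).get? "status" == some st))) = true) := by
  intro checks
  induction checks with
  | nil => intro d; simp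
  | cons c rest ih =>
    intro d
    rw [List.foldl_cons, List.any_cons, ih]
    cases hname : (PySem.Dict.mk c).get? "name" with
    | none => simp [pvStep, hname]
    | some m =>
      by_cases hm : m ∈ T
      · have hmc : PySem.Set.contains T m = true := (PySem.Set.contains_iff _ _).mpr hm
        cases hstat : (PySem.Dict.mk c).get? "status" with
        | none =>
          simp only [pvStep, hname, hmc, hstat, if_true]
          simp
        | some u =>
          simp only [pvStep, hname, hmc, hstat, if_true]
          rw [PySem.Dict.getD_insert]
          by_cases hmn : n = m
          · subst hmn
            rw [if_pos rfl]
            simp only [PySem.Set.mem_add, Bool.or_eq_true, Bool.and_eq_true, beq_iff_eq,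
              Option.some.injEq, beq_self_eq_true, true_and]
            constructor
            · rintro ((h | h) | h)
              · exact Or.inl h
              · exact Or.inr (Or.inl h.symm)
              · exact Or.inr (Or.inr h)
            · rintro (h | h | h)
              · exact Or.inl (Or.inl h)
              · exact Or.inl (Or.inr h.symm)
              · exact Or.inr h
          · have hfalse : (some m == some n) = false := by
              simp only [beq_eq_false_iff_ne, ne_eq, Option.some.injEq]
              exact fun h => hmn h.symm
            rw [if_neg hmn]
            simp [hfalse]
      · have hne : (some m == some n) = false := by
          simp only [beq_eq_false_iff_ne, ne_eq, Option.some.injEq]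
          exact fun h => hm (h ▸ hn)
        simp [pvStep, hname, hm, hne]

lemma contains_statuses (checks : List (List (String × String))) (T : PySem.Set String) (n st : String)
    (hn : n ∈ T) :
    PySem.Set.contains ((checks.foldl (pvStep T) PySem.Dict.empty).getD n PySem.Set.empty) st
      = checks.any (fun c => ((PySem.Dict.mk c).get? "name" == some n) && ((PySem.Dict.mk c).get? "status" == some st)) := by
  rw [Bool.eq_iff_iff, PySem.Set.contains_iff, mem_getD_foldl_pvStep T n st hn checks PySem.Dict.empty]
  simp [PySem.Dict.getD_empty, PySem.Set.empty]

lemma any_and_or_split (l : List (List (String × String))) (a b c : List (String × String) → Bool) :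
    l.any (fun x => a x && (b x || c x))
      = (l.any (fun x => a x && b x) || l.any (fun x => a x && c x)) := by
  induction l with
  | nil => rfl
  | cons x xs ih =>
    simp only [List.any_cons, ih]
    cases a x <;> cases b x <;> cases c x <;> simp

-- ===== VERDICT (by name: the statement is the Claim_ definition above) =====
theorem generate_domain_next_steps_py_spec : Claim_equal_generate_domain_next_steps_py := by
  intro checks domain _ _
  unfold Spec_generate_domain_next_steps_py
  simp only [generate_domain_next_steps_py, generate_domain_next_steps_py_alt, pvRules,
    List.map, List.flatMap_cons, List.flatMap_nil, List.any_cons, List.any_nil]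
  rw [contains_statuses checks _ "dns_resolution" "failure" (by decide),
      contains_statuses checks _ "dns_propagation" "warning" (by decide),
      contains_statuses checks _ "ssl_certificate" "failure" (by decide),
      contains_statuses checks _ "ssl_certificate" "warning" (by decide),
      contains_statuses checks _ "http_response" "failure" (by decide),
      contains_statuses checks _ "http_response" "warning" (by decide),
      any_and_or_split checks (fun c => (PySem.Dict.mk c).get? "name" == some "ssl_certificate")
        (fun c => (PySem.Dict.mk c).get? "status" == some "failure")
        (fun c => (PySem.Dict.mk c).get? "status" == some "warning")]
  generalize (checks.any (fun c => ((PySem.Dict.mk c).get? "name" == some "dns_resolution") && ((PySem.Dict.mk c).get? "status" == some "failure"))) = b1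
  generalize (checks.any (fun c => ((PySem.Dict.mk c).get? "name" == some "dns_propagation") && ((PySem.Dict.mk c).get? "status" == some "warning"))) = b2
  generalize (checks.any (fun c => ((PySem.Dict.mk c).get? "name" == some "ssl_certificate") && ((PySem.Dict.mk c).get? "status" == some "failure"))) = b3
  generalize (checks.any (fun c => ((PySem.Dict.mk c).get? "name" == some "ssl_certificate") && ((PySem.Dict.mk c).get? "status" == some "warning"))) = b4
  generalize (checks.any (fun c => ((PySem.Dict.mk c).get? "name" == some "http_response") && ((PySem.Dict.mk c).get? "status" == some "failure"))) = b5
  generalize (checks.any (fun c => ((PySem.Dict.mk c).get? "name" == some "http_response") && ((PySem.Dict.mk c).get? "status" == some "warning"))) = b6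
  cases b1 <;> cases b2 <;> cases b3 <;> cases b4 <;> cases b5 <;> cases b6 <;> simp
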